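-- pv_equiv track=rewrite | github.com/yowatanabe/learn-to-code | python/249/main.py | shortest_slo_violation
-- ===== SOURCE A (Python) =====
-- from collections import deque
-- from typing import List
--
-- def shortest_slo_violation(errors: List[int], R: int) -> int:
--     n = len(errors)
--     if n == 0:
--         return -1
--
--     # b[i] = errors[i] - R, P[0]=0, P[k]=sum_{i<k} b[i]
--     P = [0] * (n + 1)
--     for i in range(1, n + 1):
--         P[i] = P[i - 1] + (errors[i - 1] - R)
--
--     ans = n + 1
--     dq = deque()  # 累積和のインデックス（P が昇順になるよう保持）
--     # 標準手順：先頭で条件満たす限り更新→末尾で単調性調整→現在 r を追加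
--     for r in range(n + 1):
--         # 先頭から、P[r] - P[l] >= 0 を満たす限り答え更新
--         while dq and P[r] - P[dq[0]] >= 0:
--             ans = min(ans, r - dq[0])
--             dq.popleft()
--
--         # 末尾から、単調性を壊す値（P[末尾] >= P[r]）を削除
--         while dq and P[dq[-1]] >= P[r]:
--             dq.pop()
--
--         dq.append(r)
--
--     return ans if ans <= n else -1
-- ===== SOURCE B (Python) =====
-- def shortest_slo_violation(errors, R):
--     n = len(errors)
--     if n == 0:
--         return -1
--     ans = n + 1
--     for i in range(n):
--         s = 0
--         for j in range(i, n):
--             s += errors[j] - R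
--             if s >= 0:
--                 ans = min(ans, j - i + 1)
--                 break
--     return ans if ans <= n else -1
-- ===== Notes on version B (the rewrite author's own statement) =====
-- stated objective: simpler
-- what changed: Replaces the prefix-sum array plus monotonic deque with a direct nested scan: for each start index accumulate errors[j]-R and record the first end index where the running sum is nonnegative.
import Mathlib
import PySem

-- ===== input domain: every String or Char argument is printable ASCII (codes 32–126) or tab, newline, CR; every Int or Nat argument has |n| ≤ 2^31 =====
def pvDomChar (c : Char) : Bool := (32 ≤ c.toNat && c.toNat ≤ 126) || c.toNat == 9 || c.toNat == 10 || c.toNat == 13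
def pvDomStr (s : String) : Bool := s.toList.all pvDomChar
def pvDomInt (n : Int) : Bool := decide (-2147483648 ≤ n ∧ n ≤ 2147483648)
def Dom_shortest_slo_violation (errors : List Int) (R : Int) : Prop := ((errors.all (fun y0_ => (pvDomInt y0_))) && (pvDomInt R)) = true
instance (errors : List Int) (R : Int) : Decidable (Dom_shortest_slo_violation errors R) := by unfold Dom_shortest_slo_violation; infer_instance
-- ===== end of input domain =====

-- B replaces A's prefix-sum array + monotonic deque with a plain nested scan per start
-- index (simpler, same exact result); equivalence is over the return value only.

-- ===== PORT A =====
-- `while dq and P[r] - P[dq[0]] >= 0: ans = min(ans, r - dq[0]); dq.popleft()`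
def loopFront (P : List Int) (r : Nat) : Nat → List Nat → Nat × List Nat
  | ans, [] => (ans, [])
  | ans, l :: rest =>
    if 0 ≤ P.getD r 0 - P.getD l 0 then loopFront P r (min ans (r - l)) rest
    else (ans, l :: rest)

-- `while dq and P[dq[-1]] >= P[r]: dq.pop()` — run on the reversed deque, so the
-- right end is the head; the caller reverses before and after.
def loopBackRev (P : List Int) (r : Nat) : List Nat → List Nat
  | [] => []
  | j :: rest => if P.getD r 0 ≤ P.getD j 0 then loopBackRev P r rest else j :: rest

-- `for r in range(n + 1): …` over the remaining list of r values
def loopA (P : List Int) : Nat → List Nat → List Nat → Nat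
  | ans, _, [] => ans
  | ans, dq, r :: rs =>
    let s := loopFront P r ans dq
    let dq2 := (loopBackRev P r s.2.reverse).reverse
    loopA P s.1 (dq2 ++ [r]) rs

def shortest_slo_violation (errors : List Int) (R : Int) : Int :=
  let n := errors.length
  if n = 0 then -1
  else
    -- P[0]=0, P[i] = P[i-1] + (errors[i-1] - R) : exactly List.scanl
    let P := List.scanl (fun s e => s + (e - R)) 0 errors
    let ans := loopA P (n + 1) [] (List.range (n + 1))
    if ans ≤ n then (ans : Int) else -1

-- ===== PORT B =====
-- inner `for j in range(i, n): s += errors[j] - R; if s >= 0: … break`: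
-- length (j - i + 1) of the first prefix of the suffix whose adjusted sum is ≥ 0
def firstLen (R : Int) : List Int → Int → Nat → Option Nat
  | [], _, _ => none
  | e :: t, s, k =>
    let s' := s + (e - R)
    if 0 ≤ s' then some (k + 1) else firstLen R t s' (k + 1)

-- outer `for i in range(n)`: walk the suffixes, folding the running minimum
def outerB (R : Int) : List Int → Nat → Nat
  | [], ans => ans
  | e :: t, ans =>
    let ans' := match firstLen R (e :: t) 0 0 with
      | some len => min ans len
      | none => ans
    outerB R t ans'

def shortest_slo_violation_alt (errors : List Int) (R : Int) : Int :=
  let n := errors.length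
  if n = 0 then -1
  else
    let ans := outerB R errors (n + 1)
    if ans ≤ n then (ans : Int) else -1

-- ===== PRECONDITION & SPEC =====
def Spec_shortest_slo_violation (errors : List Int) (R : Int) (out : Int) : Prop := out = shortest_slo_violation_alt errors R
instance (errors : List Int) (R : Int) (out : Int) : Decidable (Spec_shortest_slo_violation errors R out) := by unfold Spec_shortest_slo_violation; infer_instance

-- ===== CLAIM (what is proved, stated in full; the proofs are below) =====
def Claim_equal_shortest_slo_violation : Prop := ∀ (errors : List Int) (R : Int), Dom_shortest_slo_violation errors R → Spec_shortest_slo_violation errors R (shortest_slo_violation errors R)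

-- ===== LEMMAS AND PROOFS =====

-- adjusted prefix sum: SL R xs k = sum_{i<k} (xs[i] - R)
def SL (R : Int) (xs : List Int) (k : Nat) : Int := ((xs.take k).map (fun e => e - R)).sum

-- a pair (l, r) marks a violating window errors[l:r]
def pvValid (errors : List Int) (R : Int) (l r : Nat) : Prop :=
  l < r ∧ r ≤ errors.length ∧ SL R errors l ≤ SL R errors r

-- "a is the minimum violating window length (or n+1 if none)"
def pvGood (errors : List Int) (R : Int) (a : Nat) : Prop :=
  (∀ l r, pvValid errors R l r → a ≤ r - l) ∧
  (a = errors.length + 1 ∨ ∃ l r, pvValid errors R l r ∧ a = r - l)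

theorem pvGood_unique (errors : List Int) (R : Int) (a b : Nat)
    (ha : pvGood errors R a) (hb : pvGood errors R b) : a = b := by
  obtain ⟨hac, has⟩ := ha
  obtain ⟨hbc, hbs⟩ := hb
  rcases has with rfl | ⟨l, r, hv, rfl⟩
  · rcases hbs with rfl | ⟨l, r, hv, rfl⟩
    · rfl
    · have := hac l r hv
      obtain ⟨h1, h2, _⟩ := hv
      omega
  · rcases hbs with rfl | ⟨l', r', hv', rfl⟩
    · have := hbc l r hv
      obtain ⟨h1, h2, _⟩ := hv
      omega
    · have h1 := hac l' r' hv'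
      have h2 := hbc l r hv
      omega

theorem scanl_getD (R : Int) (xs : List Int) (b : Int) (k : Nat) (hk : k ≤ xs.length) :
    (List.scanl (fun s e => s + (e - R)) b xs).getD k 0 = b + SL R xs k := by
  induction xs generalizing b k with
  | nil =>
    have : k = 0 := by simpa using hk
    subst this; simp [SL]
  | cons x t ih =>
    cases k with
    | zero => simp [List.scanl_cons, SL]
    | succ k =>
      simp only [List.scanl_cons, List.getD_cons_succ]
      rw [ih _ k (by simpa using hk)]
      simp [SL]
      ring

-- ===== B side: the nested scan computes the minimum violating window =====

theorem SL_zero (R : Int) (xs : List Int) : SL R xs 0 = 0 := by simp [SL]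

theorem SL_cons (R : Int) (e : Int) (t : List Int) (j : Nat) :
    SL R (e :: t) (j + 1) = (e - R) + SL R t j := by simp [SL]


theorem firstLen_some (R : Int) (xs : List Int) (s : Int) (k : Nat) (m : Nat)
    (h : firstLen R xs s k = some m) :
    ∃ j, 1 ≤ j ∧ j ≤ xs.length ∧ m = k + j ∧ 0 ≤ s + SL R xs j ∧
      (∀ j', 1 ≤ j' → j' < j → s + SL R xs j' < 0) := by
  induction xs generalizing s k with
  | nil => simp [firstLen] at h
  | cons e t ih =>
    simp only [firstLen] at h
    split_ifs at h with hc
    · have hm : m = k + 1 := by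
        injection h with h'
        omega
      refine ⟨1, le_refl _, by simp, hm, ?_, ?_⟩
      · have h0 : SL R (e :: t) 1 = (e - R) + SL R t 0 := SL_cons R e t 0
        rw [h0, SL_zero]
        linarith
      · intro j' h1 h2; omega
    · obtain ⟨j, hj1, hj2, hj3, hj4, hj5⟩ := ih (s + (e - R)) (k + 1) h
      refine ⟨j + 1, by omega, by simp only [List.length_cons]; omega, by omega, ?_, ?_⟩
      · rw [SL_cons]; linarith
      · intro j' h1 h2
        cases j' with
        | zero => omega
        | succ j'' =>
          cases j'' with
          | zero =>
            show s + SL R (e :: t) 1 < 0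
            have h0 : SL R (e :: t) 1 = (e - R) + SL R t 0 := SL_cons R e t 0
            rw [h0, SL_zero]
            omega
          | succ j3 =>
            have := hj5 (j3 + 1) (by omega) (by omega)
            rw [SL_cons]; linarith

theorem firstLen_none (R : Int) (xs : List Int) (s : Int) (k : Nat)
    (h : firstLen R xs s k = none) :
    ∀ j, 1 ≤ j → j ≤ xs.length → s + SL R xs j < 0 := by
  induction xs generalizing s k with
  | nil => intro j h1 h2; simp at h2; omega
  | cons e t ih =>
    simp only [firstLen] at h
    split_ifs at h with hc
    intro j h1 h2
    cases j with
      | zero => omega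
      | succ j' =>
        cases j' with
        | zero =>
          show s + SL R (e :: t) 1 < 0
          have h0 : SL R (e :: t) 1 = (e - R) + SL R t 0 := SL_cons R e t 0
          rw [h0, SL_zero]
          omega
        | succ j'' =>
          have := ih (s + (e - R)) (k + 1) h (j'' + 1) (by omega) (by simpa using h2)
          rw [SL_cons]; linarith

theorem outerB_le (R : Int) (xs : List Int) (a : Nat) : outerB R xs a ≤ a := by
  induction xs generalizing a with
  | nil => simp [outerB]
  | cons e t ih =>
    simp only [outerB]
    split
    · exact le_trans (ih _) (Nat.min_le_left _ _)
    · exact ih _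

theorem pvValid_shift (R e : Int) (t : List Int) (l r : Nat) :
    pvValid (e :: t) R (l + 1) (r + 1) ↔ pvValid t R l r := by
  unfold pvValid
  rw [SL_cons, SL_cons]
  constructor <;> rintro ⟨h1, h2, h3⟩ <;> exact ⟨by omega, by simpa using h2, by linarith⟩

theorem outerB_comp (R : Int) (xs : List Int) (a : Nat) :
    ∀ l r, pvValid xs R l r → outerB R xs a ≤ r - l := by
  induction xs generalizing a with
  | nil => rintro l r ⟨h1, h2, _⟩; simp at h2; omega
  | cons e t ih =>
    intro l r hv
    simp only [outerB]
    cases l with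
    | succ l' =>
      cases r with
      | zero => exact absurd hv.1 (by omega)
      | succ r' =>
        have hv' := (pvValid_shift R e t l' r').mp hv
        have he : r' + 1 - (l' + 1) = r' - l' := by omega
        rw [he]
        exact ih _ l' r' hv'
    | zero =>
      obtain ⟨h1, h2, h3⟩ := hv
      rw [SL_zero] at h3
      rcases hfl : firstLen R (e :: t) 0 0 with _ | m
      · have := firstLen_none R (e :: t) 0 0 hfl r (by omega) h2
        exact absurd h3 (by linarith)
      · obtain ⟨j, hj1, hj2, hj3, hj4, hj5⟩ := firstLen_some R (e :: t) 0 0 m hfl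
        have hjr : j ≤ r := by
          by_contra hlt
          exact absurd h3 (by have := hj5 r (by omega) (by omega); linarith)
        have hle : outerB R t (min a m) ≤ m := le_trans (outerB_le R t (min a m)) (Nat.min_le_right _ _)
        show outerB R t (min a m) ≤ r - 0
        omega

theorem outerB_sound (R : Int) (xs : List Int) (a : Nat) :
    outerB R xs a = a ∨ ∃ l r, pvValid xs R l r ∧ outerB R xs a = r - l := by
  induction xs generalizing a with
  | nil => left; simp [outerB]
  | cons e t ih =>
    simp only [outerB]
    rcases hfl : firstLen R (e :: t) 0 0 with _ | m
    · rcases ih a with h | ⟨l, r, hv, h⟩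
      · left; exact h
      · right
        refine ⟨l + 1, r + 1, (pvValid_shift R e t l r).mpr hv, ?_⟩
        have he : r + 1 - (l + 1) = r - l := by omega
        rw [he]; exact h
    · rcases ih (min a m) with h | ⟨l, r, hv, h⟩
      · by_cases hm : a ≤ m
        · left
          show outerB R t (min a m) = a
          rw [Nat.min_eq_left hm]
          rw [Nat.min_eq_left hm] at h
          exact h
        · right
          obtain ⟨j, hj1, hj2, hj3, hj4, hj5⟩ := firstLen_some R (e :: t) 0 0 m hfl
          refine ⟨0, j, ⟨by omega, hj2, by rw [SL_zero]; linarith⟩, ?_⟩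
          have hm' : min a m = m := Nat.min_eq_right (by omega)
          show outerB R t (min a m) = j - 0
          rw [h, hm']
          omega
      · right
        refine ⟨l + 1, r + 1, (pvValid_shift R e t l r).mpr hv, ?_⟩
        have he : r + 1 - (l + 1) = r - l := by omega
        rw [he]; exact h

theorem goodB (errors : List Int) (R : Int) :
    pvGood errors R (outerB R errors (errors.length + 1)) := by
  constructor
  · exact outerB_comp R errors _
  · rcases outerB_sound R errors (errors.length + 1) with h | ⟨l, r, hv, h⟩
    · left; exact h
    · right; exact ⟨l, r, hv, h⟩

-- ===== A side: the deque loop computes the same minimum =====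

def ValidP (P : List Int) (n : Nat) (l r : Nat) : Prop :=
  l < r ∧ r ≤ n ∧ P.getD l 0 ≤ P.getD r 0

-- ===== loopFront lemmas =====
theorem LF1 (P : List Int) (r : Nat) (ans : Nat) (dq : List Nat) :
    (loopFront P r ans dq).1 ≤ ans := by
  induction dq generalizing ans with
  | nil => simp [loopFront]
  | cons l rest ih =>
    simp only [loopFront]
    split_ifs
    · exact le_trans (ih _) (Nat.min_le_left _ _)
    · exact le_refl _

theorem LF2 (P : List Int) (r : Nat) (ans : Nat) (dq : List Nat) :
    (loopFront P r ans dq).2.Sublist dq := by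
  induction dq generalizing ans with
  | nil => simp [loopFront]
  | cons l rest ih =>
    simp only [loopFront]
    split_ifs
    · exact (ih _).trans (List.sublist_cons_self _ _)
    · exact List.Sublist.refl _

theorem LF3 (P : List Int) (r : Nat) (ans : Nat) (dq : List Nat) :
    (loopFront P r ans dq).1 = ans ∨
      ∃ l ∈ dq, 0 ≤ P.getD r 0 - P.getD l 0 ∧ (loopFront P r ans dq).1 = r - l := by
  induction dq generalizing ans with
  | nil => left; simp [loopFront]
  | cons l0 rest ih =>
    simp only [loopFront]
    split_ifs with hc
    · rcases ih (min ans (r - l0)) with h | ⟨l, hl, hc2, h⟩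
      · rcases Nat.le_total ans (r - l0) with hm | hm
        · left; rw [h]; exact Nat.min_eq_left hm
        · right; exact ⟨l0, by simp, hc, by rw [h]; exact Nat.min_eq_right hm⟩
      · right; exact ⟨l, by simp [hl], hc2, h⟩
    · left; rfl

theorem LF4 (P : List Int) (r : Nat) (ans : Nat) (dq : List Nat)
    (hpw : dq.Pairwise (fun x y => P.getD x 0 < P.getD y 0)) :
    ∀ l ∈ dq, 0 ≤ P.getD r 0 - P.getD l 0 → (loopFront P r ans dq).1 ≤ r - l := by
  induction dq generalizing ans with
  | nil => simp
  | cons l0 rest ih =>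
    intro l hl hcond
    simp only [loopFront]
    split_ifs with hc
    · rcases List.mem_cons.mp hl with rfl | hl'
      · exact le_trans (LF1 P r _ rest) (Nat.min_le_right _ _)
      · exact ih _ (List.Pairwise.of_cons hpw) l hl' hcond
    · rcases List.mem_cons.mp hl with rfl | hl'
      · exact absurd hcond hc
      · have := (List.pairwise_cons.mp hpw).1 l hl'
        exact absurd hcond (by omega)

theorem LF5 (P : List Int) (r : Nat) (ans : Nat) (dq : List Nat) :
    ∀ l ∈ dq, l ∉ (loopFront P r ans dq).2 → (loopFront P r ans dq).1 ≤ r - l := by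
  induction dq generalizing ans with
  | nil => simp
  | cons l0 rest ih =>
    intro l hl hnot
    simp only [loopFront] at hnot ⊢
    split_ifs with hc
    · rw [if_pos hc] at hnot
      rcases List.mem_cons.mp hl with rfl | hl'
      · exact le_trans (LF1 P r _ rest) (Nat.min_le_right _ _)
      · by_cases h2 : l ∈ (loopFront P r (min ans (r - l0)) rest).2
        · exact absurd h2 hnot
        · exact ih _ l hl' h2
    · rw [if_neg hc] at hnot
      exact absurd hl hnot

-- ===== loopBackRev lemmas =====
theorem MB1 (P : List Int) (r : Nat) (xs : List Nat) :
    (loopBackRev P r xs).Sublist xs := by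
  induction xs with
  | nil => simp [loopBackRev]
  | cons j rest ih =>
    simp only [loopBackRev]
    split_ifs
    · exact ih.trans (List.sublist_cons_self _ _)
    · exact List.Sublist.refl _

theorem MB2 (P : List Int) (r : Nat) (xs : List Nat) :
    ∀ j ∈ xs, j ∉ loopBackRev P r xs → P.getD r 0 ≤ P.getD j 0 := by
  induction xs with
  | nil => simp
  | cons j0 rest ih =>
    intro j hj hnot
    simp only [loopBackRev] at hnot
    split_ifs at hnot with hc
    · rcases List.mem_cons.mp hj with rfl | hj'
      · exact hc
      · exact ih j hj' hnot
    · exact absurd hj hnot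

theorem MB3 (P : List Int) (r : Nat) (xs : List Nat) :
    loopBackRev P r xs = [] ∨
      ∃ h t, loopBackRev P r xs = h :: t ∧ P.getD h 0 < P.getD r 0 := by
  induction xs with
  | nil => left; simp [loopBackRev]
  | cons j0 rest ih =>
    simp only [loopBackRev]
    split_ifs with hc
    · exact ih
    · right; exact ⟨j0, rest, rfl, by omega⟩

-- ===== the loop invariant =====
def InvA (P : List Int) (n r ans : Nat) (dq : List Nat) : Prop :=
  (∀ j ∈ dq, j < r) ∧
  dq.Pairwise (fun x y => P.getD x 0 < P.getD y 0) ∧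
  (ans = n + 1 ∨ ∃ l r', ValidP P n l r' ∧ ans = r' - l) ∧
  (∀ l r', ValidP P n l r' → r' < r → ans ≤ r' - l) ∧
  (∀ l, l < r → l ∉ dq → ans + l ≤ r ∨ ∃ j ∈ dq, l < j ∧ P.getD j 0 ≤ P.getD l 0)

theorem stepA (P : List Int) (n r ans : Nat) (dq : List Nat)
    (hInv : InvA P n r ans dq) (hr : r ≤ n) :
    InvA P n (r + 1) (loopFront P r ans dq).1
      ((loopBackRev P r (loopFront P r ans dq).2.reverse).reverse ++ [r]) := by
  obtain ⟨hBnd, hPw, hSound, hComp, hCov⟩ := hInv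
  set a' := (loopFront P r ans dq).1 with ha'
  set d' := (loopFront P r ans dq).2 with hd'
  set ys := loopBackRev P r d'.reverse with hys
  have f1 : a' ≤ ans := LF1 P r ans dq
  have f2 : d'.Sublist dq := LF2 P r ans dq
  have f3 : ys.reverse.Sublist d' := by
    have := (MB1 P r d'.reverse).reverse
    simpa using this
  have f4 : ys.reverse.Sublist dq := f3.trans f2
  have memys : ∀ j, j ∈ ys.reverse → j ∈ dq := fun j hj => f4.mem hj
  have hPw2 : ys.reverse.Pairwise (fun x y => P.getD x 0 < P.getD y 0) :=
    hPw.sublist f4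
  have hlast : ∀ a ∈ ys.reverse, P.getD a 0 < P.getD r 0 := by
    intro a ha
    rw [List.mem_reverse] at ha
    rcases MB3 P r d'.reverse with h0 | ⟨h, t, heq, hh⟩
    · rw [← hys] at h0; rw [h0] at ha; simp at ha
    · rw [← hys] at heq
      have hpwys : ys.Pairwise (fun x y => P.getD y 0 < P.getD x 0) := by
        have : d'.reverse.Pairwise (fun x y => P.getD y 0 < P.getD x 0) := by
          rw [List.pairwise_reverse]
          exact hPw.sublist f2
        exact this.sublist (MB1 P r d'.reverse)
      rw [heq] at ha hpwys
      rcases List.mem_cons.mp ha with rfl | ha'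
      · exact hh
      · have := (List.pairwise_cons.mp hpwys).1 a ha'
        omega
  constructor
  · -- bounds
    intro j hj
    rcases List.mem_append.mp hj with hj | hj
    · exact lt_trans (hBnd j (memys j hj)) (Nat.lt_succ_self r)
    · simp at hj; omega
  refine ⟨?_, ?_, ?_, ?_⟩
  · -- pairwise
    rw [List.pairwise_append]
    exact ⟨hPw2, by simp, by intro a ha b hb; simp at hb; subst hb; exact hlast a ha⟩
  · -- soundness
    rcases LF3 P r ans dq with h | ⟨l, hl, hc, h⟩
    · rw [← ha'] at h; rw [h]; exact hSound
    · right
      exact ⟨l, r, ⟨hBnd l hl, hr, by omega⟩, by rw [← ha'] at h; exact h⟩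
  · -- completeness
    intro l r' hv hr'
    rcases Nat.lt_or_ge r' r with hlt | hge
    · exact le_trans f1 (hComp l r' hv hlt)
    · obtain ⟨h1, h2, h3⟩ := hv
      have hrr : r' = r := by omega
      rw [hrr] at h1 h3 ⊢
      by_cases hmem : l ∈ dq
      · exact LF4 P r ans dq hPw l hmem (by omega)
      · rcases hCov l h1 hmem with h | ⟨j, hj, hlj, hSj⟩
        · omega
        · have := LF4 P r ans dq hPw j hj (by omega)
          omega
  · -- coverage
    intro l hl hnot
    have hlr : l ≠ r := by
      intro h; subst h
      exact hnot (List.mem_append.mpr (Or.inr (by simp)))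
    have hl' : l < r := by omega
    have hnot2 : l ∉ ys.reverse := fun h => hnot (List.mem_append.mpr (Or.inl h))
    by_cases hmem : l ∈ dq
    · by_cases hmem2 : l ∈ d'
      · -- back-popped: dominated by r
        right
        refine ⟨r, List.mem_append.mpr (Or.inr (by simp)), hl', ?_⟩
        have hys' : l ∉ ys := fun h => hnot2 (List.mem_reverse.mpr h)
        exact MB2 P r d'.reverse l (List.mem_reverse.mpr hmem2) hys'
      · -- front-popped
        left
        have := LF5 P r ans dq l hmem (by rw [← hd']; exact hmem2)
        omega
    · rcases hCov l hl' hmem with h | ⟨j, hj, hlj, hSj⟩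
      · left; omega
      · by_cases hj2 : j ∈ ys.reverse
        · right; exact ⟨j, List.mem_append.mpr (Or.inl hj2), hlj, hSj⟩
        · by_cases hj3 : j ∈ d'
          · -- j back-popped: r dominates l too
            right
            refine ⟨r, List.mem_append.mpr (Or.inr (by simp)), hl', ?_⟩
            have hys' : j ∉ ys := fun h => hj2 (List.mem_reverse.mpr h)
            have := MB2 P r d'.reverse j (List.mem_reverse.mpr hj3) hys'
            omega
          · -- j front-popped: answer already ≤ r - j < r - l
            left
            have h5 := LF5 P r ans dq j hj (by rw [← hd']; exact hj3)
            have := hBnd j hj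
            omega
def GoodP (P : List Int) (n a : Nat) : Prop :=
  (∀ l r, ValidP P n l r → a ≤ r - l) ∧ (a = n + 1 ∨ ∃ l r, ValidP P n l r ∧ a = r - l)

theorem loopA_good (P : List Int) (n : Nat) :
    ∀ k r ans dq, r + k = n + 1 → InvA P n r ans dq →
      GoodP P n (loopA P ans dq (List.range' r k)) := by
  intro k
  induction k with
  | zero =>
    intro r ans dq hk hInv
    obtain ⟨_, _, hSound, hComp, _⟩ := hInv
    simp only [List.range', loopA]
    constructor
    · intro l r' hv
      exact hComp l r' hv (by obtain ⟨_, h2, _⟩ := hv; omega)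
    · exact hSound
  | succ k ih =>
    intro r ans dq hk hInv
    rw [List.range'_succ]
    simp only [loopA]
    exact ih (r + 1) _ _ (by omega) (stepA P n r ans dq hInv (by omega))

theorem goodA_P (P : List Int) (n : Nat) :
    GoodP P n (loopA P (n + 1) [] (List.range (n + 1))) := by
  rw [List.range_eq_range']
  refine loopA_good P n (n + 1) 0 (n + 1) [] (by omega) ?_
  refine ⟨by simp, by simp, Or.inl rfl, ?_, ?_⟩
  · intro l r' hv h; omega
  · intro l h; omega

theorem valid_bridge (errors : List Int) (R : Int) (l r : Nat) :
    ValidP (List.scanl (fun s e => s + (e - R)) 0 errors) errors.length l r ↔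
      pvValid errors R l r := by
  unfold ValidP pvValid
  constructor <;> rintro ⟨h1, h2, h3⟩ <;> refine ⟨h1, h2, ?_⟩ <;>
    · have hl := scanl_getD R errors 0 l (by omega)
      have hr := scanl_getD R errors 0 r (by omega)
      omega

theorem goodA (errors : List Int) (R : Int) :
    pvGood errors R (loopA (List.scanl (fun s e => s + (e - R)) 0 errors)
      (errors.length + 1) [] (List.range (errors.length + 1))) := by
  obtain ⟨hc, hs⟩ := goodA_P (List.scanl (fun s e => s + (e - R)) 0 errors) errors.length
  constructor
  · intro l r hv
    exact hc l r ((valid_bridge errors R l r).mpr hv)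
  · rcases hs with h | ⟨l, r, hv, h⟩
    · left; exact h
    · right; exact ⟨l, r, (valid_bridge errors R l r).mp hv, h⟩

-- ===== VERDICT (by name: the statement is the Claim_ definition above) =====
theorem shortest_slo_violation_spec : Claim_equal_shortest_slo_violation := by
  intro errors R _
  unfold Spec_shortest_slo_violation shortest_slo_violation shortest_slo_violation_alt
  by_cases hn : errors.length = 0
  · simp [hn]
  · have := pvGood_unique errors R _ _ (goodA errors R) (goodB errors R)
    simp only [if_neg hn]
    rw [this]
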